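-- pv_equiv track=rewrite | github.com/miliar/Code_Jam_Webscraper | Solutions_python/Problem_55/463.py | calc_income
-- ===== SOURCE A (Python) =====
-- def calc_income(runs, space, groups):
-- 	income = 0
-- 	for i in range(runs):
-- 		inds = 0
-- 		for j in range(len(groups)):
-- 			if(inds+groups[j] <= space):
-- 				inds += groups[j]
-- 				income += groups[j]
-- 			else:
-- 				tmp = groups[:j]
-- 				groups[:j] = []
-- 				groups.extend(tmp)
-- 				break
-- 	return income
-- ===== SOURCE B (Python) =====
-- def calc_income(runs, space, groups):
--     # Return-value equivalent of A; does NOT mutate `groups` (A rotates it in place).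
--     n = len(groups)
--     if n == 0:
--         return 0
--     # The queue state is just a rotation offset of the original list; memoize,
--     # per offset first reached, the income of one run and the next offset.
--     memo = {}
--     income = 0
--     s = 0
--     for _ in range(runs):
--         if s not in memo:
--             load = 0
--             gain = 0
--             nxt = s  # everyone boarded: queue order unchanged
--             for k in range(n):
--                 g = groups[(s + k) % n]
--                 if load + g > space:
--                     nxt = (s + k) % n
--                     break
--                 load += g
--                 gain += g
--             memo[s] = (gain, nxt)
--         gain, s = memo[s]
--         income += gain
--     return income
-- ===== Notes on version B (the rewrite author's own statement) =====
-- stated objective: alternative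
-- what changed: Instead of physically rotating the queue and rescanning it on every one of the R runs, B observes that the queue state is just a rotation offset of the original list and memoizes, per offset first reached, one run's (income, next offset); intended as faster (the probe measured 2.03x at the largest size both finished, and far more when runs dominate), but adversarial inputs where many distinct offsets are reached remain quadratic, so no unqualified speed claim.
import Mathlib
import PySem

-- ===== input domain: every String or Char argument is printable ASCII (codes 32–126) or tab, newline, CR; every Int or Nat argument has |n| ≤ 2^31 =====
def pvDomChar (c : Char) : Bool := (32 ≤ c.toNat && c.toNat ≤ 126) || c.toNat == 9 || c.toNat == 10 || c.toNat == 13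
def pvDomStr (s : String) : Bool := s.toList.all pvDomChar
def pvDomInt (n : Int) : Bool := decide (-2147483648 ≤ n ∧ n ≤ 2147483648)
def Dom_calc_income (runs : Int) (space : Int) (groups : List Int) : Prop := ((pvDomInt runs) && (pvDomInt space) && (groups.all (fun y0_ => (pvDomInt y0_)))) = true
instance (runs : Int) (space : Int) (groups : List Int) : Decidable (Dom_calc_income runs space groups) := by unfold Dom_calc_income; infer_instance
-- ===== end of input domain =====

-- ===== PORT A =====
-- B replaces A's per-run in-place queue rotation and rescan by a memoized
-- per-offset (gain, next-offset) transition table; equivalence is about the RETURN VALUE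
-- only (A rotates `groups` in place, B never mutates it).
-- inner for-j loop of A: boards groups while they fit; on break, rotates the list
def aInner (space : Int) (gs : List Int) (j : Nat) (inds income : Int) : Int × List Int :=
  if h : j < gs.length then
    let g := gs[j]
    if inds + g ≤ space then aInner space gs (j+1) (inds + g) (income + g)
    else (income, gs.drop j ++ gs.take j)
  else (income, gs)
termination_by gs.length - j

-- outer for-i loop over range(runs)
def aOuter (space : Int) : Nat → Int → List Int → Int
  | 0, income, _ => income
  | Nat.succ k, income, gs =>
      let r := aInner space gs 0 0 income
      aOuter space k r.1 r.2

def calc_income (runs : Int) (space : Int) (groups : List Int) : Int :=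
  aOuter space runs.toNat 0 groups

-- ===== PORT B =====
-- inner for-k loop of B: one run's (gain, next start offset) from start offset s
def bScan (space : Int) (gs : List Int) (s : Nat) (k : Nat) (load gain : Int) : Int × Nat :=
  if h : k < gs.length then
    let g := gs[(s + k) % gs.length]'(Nat.mod_lt _ (by omega))
    if load + g > space then (gain, (s + k) % gs.length)
    else bScan space gs s (k+1) (load + g) (gain + g)
  else (gain, s)
termination_by gs.length - k

-- for-_ loop over range(runs); memo dict: entry computed on first visit of s
def bWalk (space : Int) (gs : List Int) : Nat → PySem.Dict Nat (Int × Nat) → Int → Nat → Int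
  | 0, _, income, _ => income
  | Nat.succ r, memo, income, s =>
      let memo' := if (memo.get? s).isNone then memo.insert s (bScan space gs s 0 0 0) else memo
      let e := (memo'.get? s).getD (0, 0)
      bWalk space gs r memo' (income + e.1) e.2

def calc_income_alt (runs : Int) (space : Int) (groups : List Int) : Int :=
  if groups.length = 0 then 0
  else bWalk space groups runs.toNat PySem.Dict.empty 0 0

-- ===== PRECONDITION & SPEC =====
def Spec_calc_income (runs : Int) (space : Int) (groups : List Int) (out : Int) : Prop := out = calc_income_alt runs space groups
instance (runs : Int) (space : Int) (groups : List Int) (out : Int) : Decidable (Spec_calc_income runs space groups out) := by unfold Spec_calc_income; infer_instance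

-- ===== CLAIM (what is proved, stated in full; the proofs are below) =====
def Claim_equal_calc_income : Prop := ∀ (runs : Int) (space : Int) (groups : List Int), Dom_calc_income runs space groups → Spec_calc_income runs space groups (calc_income runs space groups)

-- ===== LEMMAS AND PROOFS =====

def rot (s : Nat) (gs : List Int) : List Int := gs.drop s ++ gs.take s

theorem rot_zero (gs : List Int) : rot 0 gs = gs := by simp [rot]

theorem rot_length (s : Nat) (gs : List Int) : (rot s gs).length = gs.length := by
  simp [rot]; omega

theorem drop_append_ge (l1 l2 : List Int) (n : Nat) (h : l1.length ≤ n) :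
    (l1 ++ l2).drop n = l2.drop (n - l1.length) := by
  induction l1 generalizing n with
  | nil => simp
  | cons a t ih => cases n with
    | zero => simp at h
    | succ m => simpa using ih m (by simpa using h)

theorem take_append_ge (l1 l2 : List Int) (n : Nat) (h : l1.length ≤ n) :
    (l1 ++ l2).take n = l1 ++ l2.take (n - l1.length) := by
  induction l1 generalizing n with
  | nil => simp
  | cons a t ih => cases n with
    | zero => simp at h
    | succ m => simpa using ih m (by simpa using h)

theorem rot_get (s j : Nat) (gs : List Int) (hs : s < gs.length) (hj : j < gs.length)
    (h : j < (rot s gs).length) :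
    (rot s gs)[j] = gs[(s + j) % gs.length]'(Nat.mod_lt _ (by omega)) := by
  rcases Nat.lt_or_ge j (gs.length - s) with hc | hc
  · have e1 : (rot s gs)[j] = (gs.drop s)[j]'(by simp; omega) := by
      simp only [rot]
      rw [List.getElem_append_left (by simp; omega)]
    have hmod : (s + j) % gs.length = s + j := Nat.mod_eq_of_lt (by omega)
    rw [e1]
    simp only [List.getElem_drop, hmod]
  · have e1 : (rot s gs)[j] = (gs.take s)[j - (gs.length - s)]'(by simp; omega) := by
      simp only [rot]
      rw [List.getElem_append_right (by simp; omega)]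
      simp
    have hmod : (s + j) % gs.length = j - (gs.length - s) := by
      rw [Nat.mod_eq_sub_mod (by omega), Nat.mod_eq_of_lt (by omega)]
      omega
    rw [e1]
    simp only [List.getElem_take, hmod]

theorem rot_rot (s j : Nat) (gs : List Int) (hs : s < gs.length) (hj : j < gs.length) :
    (rot s gs).drop j ++ (rot s gs).take j = rot ((s + j) % gs.length) gs := by
  rcases Nat.lt_or_ge (s + j) gs.length with hc | hc
  · have hmod : (s + j) % gs.length = s + j := Nat.mod_eq_of_lt hc
    rw [hmod]
    have h1 : (rot s gs).drop j = gs.drop (s + j) ++ gs.take s := by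
      simp only [rot]
      rw [List.drop_append_of_le_length (by simp; omega), List.drop_drop]
    have h2 : (rot s gs).take j = (gs.drop s).take j := by
      simp only [rot]
      rw [List.take_append_of_le_length (by simp; omega)]
    rw [h1, h2, rot, List.append_assoc, ← List.take_add]
  · -- wrap around: next offset is s + j - gs.length
    have hmod : (s + j) % gs.length = s + j - gs.length := by
      rw [Nat.mod_eq_sub_mod hc, Nat.mod_eq_of_lt (by omega)]
    rw [hmod]
    have hm : j - (gs.drop s).length = s + j - gs.length := by simp; omega
    have h1 : (rot s gs).drop j = (gs.take s).drop (s + j - gs.length) := by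
      simp only [rot]
      rw [drop_append_ge _ _ _ (by simp; omega), hm]
    have h2 : (rot s gs).take j = gs.drop s ++ (gs.take s).take (s + j - gs.length) := by
      simp only [rot]
      rw [take_append_ge _ _ _ (by simp; omega), hm]
    have hd : gs.drop (s + j - gs.length) = (gs.take s).drop (s + j - gs.length) ++ gs.drop s := by
      conv_lhs => rw [← List.take_append_drop s gs]
      rw [List.drop_append_of_le_length (by simp; omega)]
      simp
    have ht : gs.take (s + j - gs.length) = (gs.take s).take (s + j - gs.length) := by
      rw [List.take_take, Nat.min_eq_left (by omega)]
    rw [h1, h2, rot, hd, ht, List.append_assoc]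

theorem bScan_gain_shift_fuel (space : Int) (gs : List Int) (s : Nat) :
    ∀ m k load g, gs.length ≤ k + m →
      bScan space gs s k load g =
        ((bScan space gs s k load 0).1 + g, (bScan space gs s k load 0).2) := by
  intro m
  induction m with
  | zero =>
      intro k load g hk
      rw [bScan, bScan]
      simp only [dif_neg (by omega : ¬ k < gs.length)]
      simp
  | succ m ih =>
      intro k load g hk
      by_cases h : k < gs.length
      · rw [bScan, bScan]
        simp only [dif_pos h]
        split_ifs with hc
        · simp
        · rw [ih (k+1) _ (g + _) (by omega), ih (k+1) _ (0 + _) (by omega)]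
          simp
          ring
      · rw [bScan, bScan]
        simp only [dif_neg h]
        simp

theorem bScan_gain_shift (space : Int) (gs : List Int) (s k : Nat) (load g : Int) :
    bScan space gs s k load g =
      ((bScan space gs s k load 0).1 + g, (bScan space gs s k load 0).2) :=
  bScan_gain_shift_fuel space gs s gs.length k load g (by omega)

theorem bScan_nxt_lt_fuel (space : Int) (gs : List Int) (s : Nat) (hs : s < gs.length) :
    ∀ m k load g, gs.length ≤ k + m → (bScan space gs s k load g).2 < gs.length := by
  intro m
  induction m with
  | zero =>
      intro k load g hk
      rw [bScan]
      simp only [dif_neg (by omega : ¬ k < gs.length)]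
      exact hs
  | succ m ih =>
      intro k load g hk
      by_cases h : k < gs.length
      · rw [bScan]
        simp only [dif_pos h]
        split_ifs with hc
        · exact Nat.mod_lt _ (by omega)
        · exact ih (k+1) _ _ (by omega)
      · rw [bScan]
        simp only [dif_neg h]
        exact hs

theorem bScan_nxt_lt (space : Int) (gs : List Int) (s k : Nat) (load g : Int)
    (hs : s < gs.length) :
    (bScan space gs s k load g).2 < gs.length :=
  bScan_nxt_lt_fuel space gs s hs gs.length k load g (by omega)

theorem aInner_eq_bScan_fuel (space : Int) (gs : List Int) (s : Nat) (hs : s < gs.length) :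
    ∀ m, ∀ j load inc, gs.length ≤ j + m →
      aInner space (rot s gs) j load inc =
        (inc + (bScan space gs s j load 0).1, rot (bScan space gs s j load 0).2 gs) := by
  intro m
  induction m with
  | zero =>
      intro j load inc hj
      have hj' : ¬ j < (rot s gs).length := by rw [rot_length]; omega
      rw [aInner, bScan]
      simp only [dif_neg hj', dif_neg (by omega : ¬ j < gs.length)]
      simp
  | succ m ih =>
      intro j load inc hj
      by_cases h : j < gs.length
      · have h' : j < (rot s gs).length := by rw [rot_length]; exact h
        rw [aInner, bScan]
        simp only [dif_pos h', dif_pos h]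
        rw [rot_get s j gs hs h h']
        split_ifs with hc hc'
        · omega
        · -- fits in both (hc : load+g ≤ space, hc' false)
          rw [ih (j+1) _ _ (by omega)]
          rw [bScan_gain_shift space gs s (j+1) _ (0 + _)]
          refine Prod.ext ?_ rfl
          simp
          ring
        · -- break in both
          rw [rot_rot s j gs hs h]
          simp
        · omega
      · have h' : ¬ j < (rot s gs).length := by rw [rot_length]; exact h
        rw [aInner, bScan]
        simp only [dif_neg h', dif_neg h]
        simp

theorem aInner_eq_bScan (space : Int) (gs : List Int) (s : Nat) (hs : s < gs.length) :
    ∀ j load inc, aInner space (rot s gs) j load inc =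
      (inc + (bScan space gs s j load 0).1, rot (bScan space gs s j load 0).2 gs) :=
  fun j load inc => aInner_eq_bScan_fuel space gs s hs gs.length j load inc (by omega)

def MemoOk (space : Int) (gs : List Int) (memo : PySem.Dict Nat (Int × Nat)) : Prop :=
  ∀ t e, memo.get? t = some e → e = bScan space gs t 0 0 0

theorem memoOk_step (space : Int) (gs : List Int) (memo : PySem.Dict Nat (Int × Nat))
    (h : MemoOk space gs memo) (s : Nat) :
    MemoOk space gs (if (memo.get? s).isNone then memo.insert s (bScan space gs s 0 0 0) else memo) := by
  split_ifs with hc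
  · intro t e he
    rw [PySem.Dict.get?_insert] at he
    split_ifs at he with ht
    · cases he; rw [ht]
    · exact h t e he
  · exact h

theorem memoOk_get (space : Int) (gs : List Int) (memo : PySem.Dict Nat (Int × Nat))
    (h : MemoOk space gs memo) (s : Nat) :
    (((if (memo.get? s).isNone then memo.insert s (bScan space gs s 0 0 0) else memo).get? s).getD (0, 0))
      = bScan space gs s 0 0 0 := by
  split_ifs with hc
  · rw [PySem.Dict.get?_insert_self]
    rfl
  · rcases ho : memo.get? s with _ | e
    · rw [ho] at hc; simp at hc
    · exact h s e ho

theorem aOuter_eq_bWalk (space : Int) (gs : List Int) :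
    ∀ k inc s memo, s < gs.length → MemoOk space gs memo →
      aOuter space k inc (rot s gs) = bWalk space gs k memo inc s := by
  intro k
  induction k with
  | zero => intro inc s memo _ _; rfl
  | succ m ih =>
      intro inc s memo hs hmemo
      show aOuter space m (aInner space (rot s gs) 0 0 inc).1 (aInner space (rot s gs) 0 0 inc).2 = _
      rw [aInner_eq_bScan space gs s hs 0 0 inc]
      show _ = bWalk space gs m _ (inc + _) _
      rw [memoOk_get space gs memo hmemo s]
      exact ih _ _ _ (bScan_nxt_lt space gs s 0 0 0 hs) (memoOk_step space gs memo hmemo s)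

theorem aOuter_nil (space : Int) : ∀ k inc, aOuter space k inc [] = inc := by
  intro k
  induction k with
  | zero => intro inc; rfl
  | succ m ih =>
      intro inc
      show aOuter space m (aInner space [] 0 0 inc).1 (aInner space [] 0 0 inc).2 = inc
      rw [aInner]
      simp
      exact ih inc

-- ===== VERDICT (by name: the statement is the Claim_ definition above) =====
theorem calc_income_spec : Claim_equal_calc_income := by
  intro runs space groups _
  show calc_income runs space groups = calc_income_alt runs space groups
  unfold calc_income calc_income_alt
  by_cases h : groups.length = 0
  · simp [h]
    rcases List.eq_nil_of_length_eq_zero h with rfl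
    exact aOuter_nil space runs.toNat 0
  · have hn : 0 < groups.length := Nat.pos_of_ne_zero h
    simp only [if_neg h]
    have := aOuter_eq_bWalk space groups runs.toNat 0 0 PySem.Dict.empty hn
      (fun t e he => by rw [PySem.Dict.get?_empty] at he; cases he)
    rw [rot_zero] at this
    exact this
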